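-- pv_equiv track=rewrite | github.com/Piquipato/tfgrna | RNAsim/rnastruct.py | binding_links
-- ===== SOURCE A (Python) =====
-- def binding_links(bdna):
--     allowed_binds = [
--         'AU',
--         'UA',
--         'AT',
--         'TA',
--         'CG',
--         'GC',
--         'GU',
--         'UG'
--     ]
--     for bind in allowed_binds:
--         if bind in bdna:
--             return True
--     return False
-- ===== SOURCE B (Python) =====
-- def binding_links(bdna):
--     bonds = {'AU', 'UA', 'AT', 'TA', 'CG', 'GC', 'GU', 'UG'}
--     for x, y in zip(bdna, bdna[1:]):
--         if x + y in bonds: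
--             return True
--     return False
-- ===== Notes on version B (the rewrite author's own statement) =====
-- stated objective: idiomatic
-- what changed: Instead of scanning the whole string once per each of the 8 allowed bonds, B makes a single pass over adjacent positions and tests the two-character slice against a set of the 8 bonds.
import Mathlib
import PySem

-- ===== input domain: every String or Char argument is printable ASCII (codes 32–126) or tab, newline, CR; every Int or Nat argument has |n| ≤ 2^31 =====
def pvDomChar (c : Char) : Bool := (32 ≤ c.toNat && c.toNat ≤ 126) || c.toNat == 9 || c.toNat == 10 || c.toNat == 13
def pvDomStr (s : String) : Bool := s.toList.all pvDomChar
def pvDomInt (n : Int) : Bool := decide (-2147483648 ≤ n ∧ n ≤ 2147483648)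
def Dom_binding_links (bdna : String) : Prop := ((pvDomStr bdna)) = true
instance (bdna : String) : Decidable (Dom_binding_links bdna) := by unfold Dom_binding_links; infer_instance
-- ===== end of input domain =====

-- B replaces A's 8 whole-string substring scans by ONE pass over adjacent character
-- pairs tested against a set of the 8 allowed bonds (objective: idiomatic single scan).


-- ===== PORT A =====
-- allowed_binds = ['AU', 'UA', 'AT', 'TA', 'CG', 'GC', 'GU', 'UG']
def allowedBinds : List String := ["AU", "UA", "AT", "TA", "CG", "GC", "GU", "UG"]

-- for bind in allowed_binds: if bind in bdna: return True / return False
def bindingLoopA (bdna : String) : List String → Bool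
  | [] => false
  | bind :: rest => if PySem.Str.isIn bind bdna then true else bindingLoopA bdna rest

def binding_links (bdna : String) : Bool :=
  bindingLoopA bdna allowedBinds

-- ===== PORT B =====
-- bonds = {'AU','UA','AT','TA','CG','GC','GU','UG'} — a set of 8 distinct two-char
-- strings, represented as their (Char × Char) pairs (x + y in bonds ↔ (x, y) ∈ bonds).
def bondSet : PySem.Set (Char × Char) :=
  PySem.Set.ofList [('A','U'), ('U','A'), ('A','T'), ('T','A'),
                    ('C','G'), ('G','C'), ('G','U'), ('U','G')]

-- for x, y in zip(bdna, bdna[1:]): if x + y in bonds: return True / return False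
def bindingLoopB : List (Char × Char) → Bool
  | [] => false
  | p :: rest => if p ∈ bondSet then true else bindingLoopB rest

def binding_links_alt (bdna : String) : Bool :=
  bindingLoopB (List.zip bdna.toList (bdna.toList.drop 1))

-- ===== PRECONDITION & SPEC =====
def Spec_binding_links (bdna : String) (out : Bool) : Prop := out = binding_links_alt bdna
instance (bdna : String) (out : Bool) : Decidable (Spec_binding_links bdna out) := by unfold Spec_binding_links; infer_instance

-- ===== CLAIM (what is proved, stated in full; the proofs are below) =====
def Claim_equal_binding_links : Prop := ∀ (bdna : String), Dom_binding_links bdna → Spec_binding_links bdna (binding_links bdna)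

-- ===== LEMMAS AND PROOFS =====

-- A's early-return loop over patterns is the disjunction of the membership tests.
lemma bindingLoopA_eq_any (bdna : String) (l : List String) :
    bindingLoopA bdna l = l.any (fun bind => PySem.Str.isIn bind bdna) := by
  induction l with
  | nil => rfl
  | cons b rest ih => simp [bindingLoopA, ih]

-- B's early-return loop over pairs is the disjunction of the set-membership tests.
lemma bindingLoopB_eq_any (l : List (Char × Char)) :
    bindingLoopB l = l.any (fun p => decide (p ∈ bondSet)) := by
  induction l with
  | nil => rfl
  | cons p rest ih =>
    by_cases h : p ∈ bondSet <;> simp [bindingLoopB, ih, h]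

-- An adjacent pair of s is exactly a two-element infix of s.
lemma pair_mem_zip_iff (s : List Char) (x y : Char) :
    (x, y) ∈ List.zip s (s.drop 1) ↔ [x, y] <:+: s := by
  induction s with
  | nil => simp
  | cons a t ih =>
    cases t with
    | nil =>
      simp only [List.drop_one, List.tail_cons, List.zip_nil_right, List.not_mem_nil, false_iff]
      rintro ⟨pre, suf, h⟩
      have := congrArg List.length h
      simp at this; omega
    | cons b u =>
      simp only [List.drop_one, List.tail_cons, List.zip_cons_cons, List.mem_cons] at *
      constructor
      · rintro (h | h)
        · cases h; exact ⟨[], u, by simp⟩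
        · exact ((ih.mp (by simpa [List.drop_one] using h)).trans (List.suffix_cons a (b::u)).isInfix)
      · rintro ⟨pre, suf, h⟩
        cases pre with
        | nil => left; cases h; rfl
        | cons p ps =>
          right
          apply ih.mpr
          have hbu : ps ++ [x, y] ++ suf = b :: u := by
            injection h with h1 h2
          exact ⟨ps, suf, hbu⟩

-- ===== VERDICT (by name: the statement is the Claim_ definition above) =====
theorem binding_links_spec : Claim_equal_binding_links := by
  intro bdna _
  show binding_links bdna = binding_links_alt bdna
  rw [binding_links, binding_links_alt, bindingLoopA_eq_any, bindingLoopB_eq_any]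
  rw [Bool.eq_iff_iff]
  simp only [List.any_eq_true, decide_eq_true_eq]
  constructor
  · rintro ⟨bind, hb, hin⟩
    rw [PySem.Str.isIn_iff_infix] at hin
    fin_cases hb
    · exact ⟨('A','U'), (pair_mem_zip_iff bdna.toList _ _).mpr hin, by decide⟩
    · exact ⟨('U','A'), (pair_mem_zip_iff bdna.toList _ _).mpr hin, by decide⟩
    · exact ⟨('A','T'), (pair_mem_zip_iff bdna.toList _ _).mpr hin, by decide⟩
    · exact ⟨('T','A'), (pair_mem_zip_iff bdna.toList _ _).mpr hin, by decide⟩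
    · exact ⟨('C','G'), (pair_mem_zip_iff bdna.toList _ _).mpr hin, by decide⟩
    · exact ⟨('G','C'), (pair_mem_zip_iff bdna.toList _ _).mpr hin, by decide⟩
    · exact ⟨('G','U'), (pair_mem_zip_iff bdna.toList _ _).mpr hin, by decide⟩
    · exact ⟨('U','G'), (pair_mem_zip_iff bdna.toList _ _).mpr hin, by decide⟩
  · rintro ⟨⟨x, y⟩, hz, hmem⟩
    have hinf := (pair_mem_zip_iff bdna.toList x y).mp hz
    have hmem' : (x, y) ∈ [('A','U'), ('U','A'), ('A','T'), ('T','A'),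
        ('C','G'), ('G','C'), ('G','U'), ('U','G')] := by
      simpa [bondSet, PySem.Set.mem_ofList] using hmem
    fin_cases hmem'
    · exact ⟨"AU", by decide, (PySem.Str.isIn_iff_infix _ _).mpr hinf⟩
    · exact ⟨"UA", by decide, (PySem.Str.isIn_iff_infix _ _).mpr hinf⟩
    · exact ⟨"AT", by decide, (PySem.Str.isIn_iff_infix _ _).mpr hinf⟩
    · exact ⟨"TA", by decide, (PySem.Str.isIn_iff_infix _ _).mpr hinf⟩
    · exact ⟨"CG", by decide, (PySem.Str.isIn_iff_infix _ _).mpr hinf⟩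
    · exact ⟨"GC", by decide, (PySem.Str.isIn_iff_infix _ _).mpr hinf⟩
    · exact ⟨"GU", by decide, (PySem.Str.isIn_iff_infix _ _).mpr hinf⟩
    · exact ⟨"UG", by decide, (PySem.Str.isIn_iff_infix _ _).mpr hinf⟩
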